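-- pv_equiv track=rewrite | github.com/ANewProfile/python | YoungWonks/level3/YWLesson3.py | string_to_letters_counts
-- ===== SOURCE A (Python) =====
-- def sort(input: dict):
--     return {key: input[key] for key in sorted(input)}
--
-- def string_to_letters_counts(input: str, history: dict):
--     letters = {}
--     new_history = history.copy()
--
--     for letter in input:
--         if letter == ' ':
--             continue
--
--         if letter.upper() in letters.keys():
--             letters[letter.upper()] += 1
--         else:
--             letters[letter.upper()] = 1
--             letters = sort(letters)
--             new_history = update_history(new_history, letters)
--
--     return letters, new_history
--
-- def update_history(old_history, new_letters):
--     new_history = old_history.copy()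
--
--     for i in range(0, len(new_letters)):
--         try:
--             if new_history[i][-1] != list(new_letters.keys())[i]:
--                 new_history[i].append(list(new_letters.keys())[i])
--         except KeyError:
--             new_history[i] = [list(new_letters.keys())[i]]
--
--     return new_history
-- ===== SOURCE B (Python) =====
-- def string_to_letters_counts(input: str, history: dict):
--     # Different strategy from the original: instead of re-sorting the whole dict
--     # and re-scanning every history position on each new letter, compute the
--     # insertion point of the new letter and touch ONLY the shifted suffix of
--     # positions [pos, m-1]: positions below pos keep their value (no scan
--     # needed), positions pos..m-2 were synced by the previous update so the
--     # append there is unconditional, and only the brand-new position m-1 is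
--     # checked against the caller-supplied history.  Return value equals the
--     # original's; unlike it, B does not mutate the caller's history lists.
--     counts = {}
--     srt = []                      # sorted distinct letters seen so far
--     hist = {k: v for k, v in history.items()}
--     for ch in input:
--         if ch == ' ':
--             continue
--         u = ch.upper()
--         if u in counts:
--             counts[u] += 1
--             continue
--         counts[u] = 1
--         pos = 0
--         while pos < len(srt) and srt[pos] < u:
--             pos += 1
--         m = len(srt) + 1          # new number of distinct letters
--         for j in range(pos, m - 1):           # synced suffix: append always
--             hist[j] = hist[j] + [u if j == pos else srt[j - 1]]
--         v = u if m - 1 == pos else srt[m - 2]  # the brand-new last position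
--         if m - 1 in hist:
--             if hist[m - 1][-1] != v:
--                 hist[m - 1] = hist[m - 1] + [v]
--         else:
--             hist[m - 1] = [v]
--         srt.insert(pos, u)
--     return {k: counts[k] for k in srt}, hist
-- ===== Notes on version B (the rewrite author's own statement) =====
-- stated objective: alternative
-- what changed: B never re-sorts and never re-scans all history positions: on each new letter it computes the insertion point pos and updates only the shifted suffix of positions [pos, m-1] - unconditional appends on the already-synced positions pos..m-2 and a single membership/last check at the brand-new position m-1 - whereas A re-sorts the whole dict and compares every position 0..m-1 against a rebuilt list(keys()); B also does not mutate the caller's history lists (the return value is identical).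
import Mathlib
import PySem

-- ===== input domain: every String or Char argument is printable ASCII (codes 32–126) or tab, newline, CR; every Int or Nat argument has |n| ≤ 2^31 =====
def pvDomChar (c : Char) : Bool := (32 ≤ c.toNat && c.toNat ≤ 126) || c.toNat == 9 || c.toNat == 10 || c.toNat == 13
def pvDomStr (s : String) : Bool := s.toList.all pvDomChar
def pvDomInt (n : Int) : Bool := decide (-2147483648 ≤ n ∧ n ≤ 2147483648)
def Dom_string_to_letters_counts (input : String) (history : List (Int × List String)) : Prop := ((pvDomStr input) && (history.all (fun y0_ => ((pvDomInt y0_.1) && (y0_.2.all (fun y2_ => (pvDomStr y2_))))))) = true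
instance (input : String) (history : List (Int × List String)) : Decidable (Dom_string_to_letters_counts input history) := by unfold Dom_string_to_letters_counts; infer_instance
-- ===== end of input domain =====

-- B replaces A's per-new-letter full dict re-sort and full history rescan by an insertion-point
-- computation that touches ONLY the shifted suffix of history positions.  Return values are proved
-- equal; A additionally MUTATES the caller's history lists in place (shallow copy + append), B does
-- not — the claim is about the return value only.

-- ===== PORT A =====
-- def sort(input): return {key: input[key] for key in sorted(input)}
-- (input[key] is always present — keys come from the dict itself — so it is d.getD key 0, exact)
def pvSortA (d : PySem.Dict String Int) : PySem.Dict String Int :=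
  PySem.Dict.ofList ((PySem.List.sorted d.keys (fun k => k) false).map (fun k => (k, d.getD k 0)))

-- update_history: for i in range(0, len(new_letters)): try … except KeyError …
-- `new_history[i][-1]` on an EMPTY list raises IndexError in Python (not caught): Pre_ excludes
-- exactly those inputs; the `none` branch here is unreachable under Pre_.
def pvUpdateHistoryA (old : PySem.Dict Int (List String)) (letters : PySem.Dict String Int) :
    PySem.Dict Int (List String) :=
  (PySem.List.pyRange 0 (letters.size : Int) 1).foldl (fun nh i =>
    match nh.get? i with
    | some L =>
        match PySem.List.pyGet? L (-1) with
        | some last =>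
            if last ≠ PySem.List.pyGetD letters.keys i "" then
              nh.insert i (L ++ [PySem.List.pyGetD letters.keys i ""])
            else nh
        | none => nh      -- Python raises IndexError here; outside Pre_
    | none => nh.insert i [PySem.List.pyGetD letters.keys i ""]) old

def string_to_letters_counts (input : String) (history : List (Int × List String)) :
    (List (String × Int)) × (List (Int × List String)) :=
  let st := input.toList.foldl (fun st c =>
    if c == ' ' then st
    else
      let u := PySem.Str.upper (String.mk [c])
      if st.1.contains u then (st.1.modify u 0 (· + 1), st.2)
      else
        let letters := pvSortA (st.1.insert u 1)
        (letters, pvUpdateHistoryA st.2 letters))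
    ((PySem.Dict.empty : PySem.Dict String Int), PySem.Dict.ofList history)
  (st.1.items, st.2.items)

-- ===== PORT B =====
-- while pos < len(srt) and srt[pos] < u: pos += 1
def pvInsPos (ks : List String) (u : String) : Nat :=
  match ks with
  | [] => 0
  | k :: t => if k < u then pvInsPos t u + 1 else 0

-- for j in range(pos, m - 1): hist[j] = hist[j] + [u if j == pos else srt[j-1]]
-- (hist[j] always exists here — every position below the current length was already written —
-- so the `none` KeyError branch is unreachable)
def pvSuffixUpd (hist : PySem.Dict Int (List String)) (srt : List String) (u : String)
    (pos : Nat) : PySem.Dict Int (List String) :=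
  (PySem.List.pyRange (pos : Int) (srt.length : Int) 1).foldl (fun h j =>
    match h.get? j with
    | some L => h.insert j (L ++ [if j = (pos : Int) then u else PySem.List.pyGetD srt (j - 1) ""])
    | none => h) hist

-- v = u if m - 1 == pos else srt[m - 2]; if m-1 in hist: if hist[m-1][-1] != v: … else: hist[m-1]=[v]
-- (`hist[m-1][-1]` on an EMPTY list raises IndexError in Python: outside Pre_; `none` branch unreachable)
def pvLastUpd (hist : PySem.Dict Int (List String)) (srt : List String) (u : String)
    (pos : Nat) : PySem.Dict Int (List String) :=
  let v := if srt.length = pos then u else PySem.List.pyGetD srt ((srt.length : Int) - 1) ""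
  match hist.get? (srt.length : Int) with
  | some L =>
      match PySem.List.pyGet? L (-1) with
      | some last => if last ≠ v then hist.insert (srt.length : Int) (L ++ [v]) else hist
      | none => hist
  | none => hist.insert (srt.length : Int) [v]

def string_to_letters_counts_alt (input : String) (history : List (Int × List String)) :
    (List (String × Int)) × (List (Int × List String)) :=
  let st := input.toList.foldl (fun st c =>
    if c == ' ' then st
    else
      let u := PySem.Str.upper (String.mk [c])
      if st.1.contains u then (st.1.modify u 0 (· + 1), st.2.1, st.2.2)
      else
        let pos := pvInsPos st.2.1 u
        let hist' := pvLastUpd (pvSuffixUpd st.2.2 st.2.1 u pos) st.2.1 u pos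
        (st.1.insert u 1, PySem.List.insert st.2.1 (pos : Int) u, hist'))
    ((PySem.Dict.empty : PySem.Dict String Int), ([] : List String),
      PySem.Dict.ofList history)
  (st.2.1.map (fun k => (k, st.1.getD k 0)), st.2.2.items)

-- ===== PRECONDITION & SPEC =====
-- Pre_ excludes exactly the inputs on which A raises IndexError: a history entry (i, []) with
-- 0 ≤ i < (number of distinct non-space characters of input, case-folded) — update_history then
-- evaluates [][-1].  A returns normally on every other input.
def Pre_string_to_letters_counts (input : String) (history : List (Int × List String)) : Prop :=
  ∀ i ∈ PySem.List.pyRange 0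
      ((PySem.Set.ofList ((input.toList.filter (fun c => c ≠ ' ')).map
          (fun c => PySem.Str.upper (String.mk [c])))).length : Int) 1,
    (PySem.Dict.ofList history).get? i ≠ some []
instance (input : String) (history : List (Int × List String)) :
    Decidable (Pre_string_to_letters_counts input history) := by
  unfold Pre_string_to_letters_counts; infer_instance

def pvWitness_string_to_letters_counts : String × (List (Int × List String)) :=
  ("ab ba!", [(0, ["A"]), (-3, [])])

def Spec_string_to_letters_counts (input : String) (history : List (Int × List String)) (out : (List (String × Int)) × (List (Int × List String))) : Prop := out = string_to_letters_counts_alt input history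
instance (input : String) (history : List (Int × List String)) (out : (List (String × Int)) × (List (Int × List String))) : Decidable (Spec_string_to_letters_counts input history out) := by unfold Spec_string_to_letters_counts; infer_instance

-- ===== CLAIM (what is proved, stated in full; the proofs are below) =====
def Claim_equal_string_to_letters_counts : Prop := ∀ (input : String) (history : List (Int × List String)), Dom_string_to_letters_counts input history → Pre_string_to_letters_counts input history → Spec_string_to_letters_counts input history (string_to_letters_counts input history)

-- ===== LEMMAS AND PROOFS =====

-- A's per-new-letter update step on the history, abbreviated for the proofs
def pvStepA (ks : List String) (nh : PySem.Dict Int (List String)) (i : Int) :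
    PySem.Dict Int (List String) :=
  match nh.get? i with
  | some L =>
      match PySem.List.pyGet? L (-1) with
      | some last =>
          if last ≠ PySem.List.pyGetD ks i "" then nh.insert i (L ++ [PySem.List.pyGetD ks i ""])
          else nh
      | none => nh
  | none => nh.insert i [PySem.List.pyGetD ks i ""]

-- B's suffix step, abbreviated
def pvStepB (srt : List String) (u : String) (pos : Nat)
    (h : PySem.Dict Int (List String)) (j : Int) : PySem.Dict Int (List String) :=
  match h.get? j with
  | some L => h.insert j (L ++ [if j = (pos : Int) then u else PySem.List.pyGetD srt (j - 1) ""])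
  | none => h

theorem pvUpdateHistoryA_eq (old : PySem.Dict Int (List String)) (letters : PySem.Dict String Int) :
    pvUpdateHistoryA old letters
      = (PySem.List.pyRange 0 (letters.size : Int) 1).foldl (pvStepA letters.keys) old := rfl

theorem pvSuffixUpd_eq (hist : PySem.Dict Int (List String)) (srt : List String) (u : String)
    (pos : Nat) :
    pvSuffixUpd hist srt u pos
      = (PySem.List.pyRange (pos : Int) (srt.length : Int) 1).foldl (pvStepB srt u pos) hist := rfl

-- The relation between A's state (letters, nh) and B's state (counts, srt, hist)
def pvInv (history : List (Int × List String)) (S : List String)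
    (a : PySem.Dict String Int × PySem.Dict Int (List String))
    (b : PySem.Dict String Int × List String × PySem.Dict Int (List String)) : Prop :=
  a.1.items = b.2.1.map (fun k => (k, b.1.getD k 0)) ∧
  a.2 = b.2.2 ∧
  b.2.1.Pairwise (· < ·) ∧
  (∀ x : String, b.1.contains x = true ↔ x ∈ b.2.1) ∧
  (∀ j : Nat, j < b.2.1.length →
      ∃ L, b.2.2.get? (j : Int) = some L ∧
        PySem.List.pyGet? L (-1) = some (b.2.1.getD j "")) ∧
  (∀ i : Int, (b.2.1.length : Int) ≤ i → b.2.2.get? i = (PySem.Dict.ofList history).get? i) ∧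
  (∀ x ∈ b.2.1, x ∈ S)

theorem pvInsPos_le (ks : List String) (u : String) : pvInsPos ks u ≤ ks.length := by
  induction ks with
  | nil => simp [pvInsPos]
  | cons k t ih => simp only [pvInsPos]; split_ifs <;> simp <;> omega

theorem pvInsert_pairwise (ks : List String) (u : String) (hs : ks.Pairwise (· < ·))
    (hu : u ∉ ks) :
    (ks.take (pvInsPos ks u) ++ u :: ks.drop (pvInsPos ks u)).Pairwise (· < ·) := by
  induction ks with
  | nil => simp
  | cons k t ih =>
    rcases List.pairwise_cons.mp hs with ⟨hk, ht⟩
    simp only [List.mem_cons, not_or] at hu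
    by_cases h : k < u
    · simp only [pvInsPos, if_pos h, List.take_succ_cons, List.drop_succ_cons, List.cons_append]
      refine List.pairwise_cons.mpr ⟨?_, ih ht hu.2⟩
      intro y hy
      simp only [List.mem_append, List.mem_cons] at hy
      rcases hy with h1 | h2 | h3
      · exact hk y (List.mem_of_mem_take h1)
      · exact h2 ▸ h
      · exact hk y (List.mem_of_mem_drop h3)
    · have huk : u < k := lt_of_le_of_ne (not_lt.mp h) hu.1
      simp only [pvInsPos, if_neg h, List.take_zero, List.drop_zero, List.nil_append]
      refine List.pairwise_cons.mpr ⟨?_, hs⟩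
      intro y hy
      rcases List.mem_cons.mp hy with rfl | hyt
      · exact huk
      · exact lt_trans huk (hk y hyt)

-- helper: items of ofList with distinct keys
theorem pvItems_ofList {κ ν : Type} [BEq κ] [LawfulBEq κ] (l : List (κ × ν))
    (h : (l.map Prod.fst).Nodup) : (PySem.Dict.ofList l).items = l := by
  show (List.foldl (fun d p => d.insert p.1 p.2) PySem.Dict.empty l).items = l
  rw [PySem.Dict.items_foldl_insert_fresh l Prod.fst Prod.snd _ (by simp) h]
  simp [PySem.Dict.empty]

theorem pvKeys_of_items_map (la : PySem.Dict String Int) (ks : List String)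
    (g : String → Int) (h1 : la.items = ks.map (fun k => (k, g k))) : la.keys = ks := by
  simp [PySem.Dict.keys, h1, List.map_map, Function.comp_def]

theorem pvGetD_of_items_map (la : PySem.Dict String Int) (ks : List String)
    (g : String → Int) (h1 : la.items = ks.map (fun k => (k, g k))) (hnd : ks.Nodup)
    (k : String) (hk : k ∈ ks) : la.getD k 0 = g k := by
  have hmem : (k, g k) ∈ la.items := by
    rw [h1]; exact List.mem_map_of_mem hk
  have hkeys : la.keys.Nodup := by rw [pvKeys_of_items_map la ks g h1]; exact hnd
  exact PySem.Dict.getD_of_mem_items la hmem hkeys 0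

-- step preservation, increment case pieces
theorem pvInc_items (la cnt : PySem.Dict String Int) (ks : List String) (u : String)
    (h1 : la.items = ks.map (fun k => (k, cnt.getD k 0))) (hnd : ks.Nodup) (hu : u ∈ ks) :
    (la.modify u 0 (· + 1)).items = ks.map (fun k => (k, (cnt.modify u 0 (· + 1)).getD k 0)) := by
  have hkeys : la.keys = ks := pvKeys_of_items_map la ks _ h1
  have hcont : la.contains u = true := by
    rw [PySem.Dict.contains_iff_mem_keys, hkeys]; exact hu
  have hkeys' : (la.modify u 0 (· + 1)).keys = ks := by
    rw [PySem.Dict.keys_modify, PySem.Dict.keys_insert_of_contains _ _ hcont, hkeys]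
  rw [PySem.Dict.items_eq_map_keys _ (hkeys' ▸ hnd) 0, hkeys']
  refine List.map_congr_left ?_
  intro k hk
  rw [PySem.Dict.getD_modify, PySem.Dict.getD_modify]
  by_cases hku : k = u
  · subst hku
    rw [if_pos rfl, if_pos rfl, pvGetD_of_items_map la ks _ h1 hnd k hk]
  · rw [if_neg hku, if_neg hku, pvGetD_of_items_map la ks _ h1 hnd k hk]

-- insert case: A's sort of the extended dict equals B's sorted-insert list
theorem pvIns_items (la cnt : PySem.Dict String Int) (ks : List String) (u : String)
    (h1 : la.items = ks.map (fun k => (k, cnt.getD k 0))) (hp : ks.Pairwise (· < ·))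
    (hu : u ∉ ks) :
    (pvSortA (la.insert u 1)).items =
      (PySem.List.insert ks ((pvInsPos ks u : Nat) : Int) u).map
        (fun k => (k, (cnt.insert u 1).getD k 0)) := by
  have hnd : ks.Nodup := hp.imp (fun h => ne_of_lt h)
  have hkeys : la.keys = ks := pvKeys_of_items_map la ks _ h1
  have hcont : la.contains u = false := by
    rw [← Bool.not_eq_true, PySem.Dict.contains_iff_mem_keys, hkeys]; exact hu
  have hks' : PySem.List.insert ks ((pvInsPos ks u : Nat) : Int) u
      = ks.take (pvInsPos ks u) ++ u :: ks.drop (pvInsPos ks u) :=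
    PySem.List.insert_natCast ks (pvInsPos ks u) u (pvInsPos_le ks u)
  set ks' := PySem.List.insert ks ((pvInsPos ks u : Nat) : Int) u with hdef
  have hperm : ks'.Perm (ks ++ [u]) := by
    rw [hks']
    have h2 : (u :: (ks.take (pvInsPos ks u) ++ ks.drop (pvInsPos ks u))).Perm (ks ++ [u]) := by
      rw [List.take_append_drop]
      exact (List.perm_append_singleton u ks).symm
    exact List.perm_middle.trans h2
  have hpair' : ks'.Pairwise (· < ·) := by rw [hks']; exact pvInsert_pairwise ks u hp hu
  have hnd' : ks'.Nodup := hpair'.imp (fun h => ne_of_lt h)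
  have hkeysd1 : (la.insert u 1).keys = ks ++ [u] := by
    rw [PySem.Dict.keys_insert_of_not_contains _ _ hcont, hkeys]
  have hsorted : PySem.List.sorted (la.insert u 1).keys (fun k => k) false = ks' := by
    rw [hkeysd1]
    exact PySem.List.sorted_eq_of_perm_of_pairwise_lt _ _ _ hperm hpair'
  show (PySem.Dict.ofList _).items = _
  rw [hsorted, pvItems_ofList _ (by simpa [List.map_map, Function.comp_def] using hnd')]
  refine List.map_congr_left ?_
  intro k hk
  have hks : k ∈ ks ++ [u] := hperm.mem_iff.mp hk
  rw [PySem.Dict.getD_insert, PySem.Dict.getD_insert]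
  by_cases hku : k = u
  · rw [if_pos hku, if_pos hku]
  · rw [if_neg hku, if_neg hku]
    have : k ∈ ks := by
      rcases List.mem_append.mp hks with h | h
      · exact h
      · simp at h; exact absurd h hku
    rw [pvGetD_of_items_map la ks _ h1 hnd k this]

theorem pvKs'_facts (ks : List String) (u : String) (hp : ks.Pairwise (· < ·)) (hu : u ∉ ks) :
    (PySem.List.insert ks ((pvInsPos ks u : Nat) : Int) u).Pairwise (· < ·) ∧
    (∀ x, x ∈ PySem.List.insert ks ((pvInsPos ks u : Nat) : Int) u ↔ x ∈ ks ∨ x = u) := by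
  have hks' := PySem.List.insert_natCast ks (pvInsPos ks u) u (pvInsPos_le ks u)
  rw [hks']
  refine ⟨pvInsert_pairwise ks u hp hu, ?_⟩
  intro x
  constructor
  · intro hx
    rcases List.mem_append.mp hx with h | h
    · exact Or.inl (List.mem_of_mem_take h)
    · rcases List.mem_cons.mp h with rfl | h
      · exact Or.inr rfl
      · exact Or.inl (List.mem_of_mem_drop h)
  · intro hx
    rcases hx with h | rfl
    · rcases (List.take_append_drop (pvInsPos ks u) ks ▸ h : x ∈ _ ++ _) with h'
      rcases List.mem_append.mp h' with h'' | h''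
      · exact List.mem_append.mpr (Or.inl h'')
      · exact List.mem_append.mpr (Or.inr (List.mem_cons_of_mem _ h''))
    · exact List.mem_append.mpr (Or.inr (List.mem_cons_self))

-- indexing into the inserted sorted list
theorem pvSrt'_getD (srt : List String) (u : String) (pos : Nat) (hpos : pos ≤ srt.length) :
    (∀ j : Nat, j < pos →
        (srt.take pos ++ u :: srt.drop pos).getD j "" = srt.getD j "") ∧
    (srt.take pos ++ u :: srt.drop pos).getD pos "" = u ∧
    (∀ j : Nat, pos < j → j ≤ srt.length →
        (srt.take pos ++ u :: srt.drop pos).getD j "" = srt.getD (j - 1) "") := by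
  have hlen : (srt.take pos).length = pos := by simp [Nat.min_eq_left hpos]
  refine ⟨?_, ?_, ?_⟩
  · intro j hj
    rw [List.getD_eq_getElem?_getD, List.getD_eq_getElem?_getD,
      List.getElem?_append_left (by omega), List.getElem?_take_of_lt hj]
  · rw [List.getD_eq_getElem?_getD, List.getElem?_append_right (by omega), hlen]
    simp
  · intro j h1 h2
    rw [List.getD_eq_getElem?_getD, List.getD_eq_getElem?_getD,
      List.getElem?_append_right (by omega), hlen]
    have hc : j - pos = (j - pos - 1) + 1 := by omega
    rw [hc, List.getElem?_cons_succ, List.getElem?_drop]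
    have hidx : pos + (j - pos - 1) = j - 1 := by omega
    rw [hidx]

-- a fold whose every step fixes the start state is the identity
theorem pvFoldlFix {α β : Type} (f : β → α → β) (s : β) (l : List α)
    (h : ∀ x ∈ l, f s x = s) : l.foldl f s = s := by
  induction l with
  | nil => rfl
  | cons x t ih =>
    rw [List.foldl_cons, h x (List.mem_cons_self)]
    exact ih (fun y hy => h y (List.mem_cons_of_mem _ hy))

-- folds over dict-updating steps touch only their own key
theorem pvStepB_get?_of_ne (srt : List String) (u : String) (pos : Nat)
    (h : PySem.Dict Int (List String)) (j i : Int) (hne : i ≠ j) :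
    (pvStepB srt u pos h j).get? i = h.get? i := by
  unfold pvStepB
  cases hg : h.get? j with
  | none => rfl
  | some L => exact PySem.Dict.get?_insert_of_ne _ _ hne

theorem pvFoldB_get?_of_notmem (srt : List String) (u : String) (pos : Nat)
    (l : List Int) (s : PySem.Dict Int (List String)) (i : Int) (hi : ∀ x ∈ l, i ≠ x) :
    (l.foldl (pvStepB srt u pos) s).get? i = s.get? i := by
  induction l generalizing s with
  | nil => rfl
  | cons x t ih =>
    rw [List.foldl_cons, ih _ (fun y hy => hi y (List.mem_cons_of_mem _ hy)),
      pvStepB_get?_of_ne _ _ _ _ _ _ (hi x (List.mem_cons_self))]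

-- ===== the core: A's full-scan history update equals B's suffix update =====

theorem pvNodupSubset_length (l s : List String) (h1 : l.Nodup) (h2 : l ⊆ s) :
    l.length ≤ s.length := by
  calc l.length = l.toFinset.card := (List.toFinset_card_of_nodup h1).symm
    _ ≤ s.toFinset.card := Finset.card_le_card
        (fun x hx => List.mem_toFinset.mpr (h2 (List.mem_toFinset.mp hx)))
    _ ≤ s.length := s.toFinset_card_le

theorem pvGetD_mem (xs : List String) (j : Nat) (h : j < xs.length) : xs.getD j "" ∈ xs := by
  rw [List.getD_eq_getElem _ _ h]; exact List.getElem_mem h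

-- the value B appends at position j equals the new sorted list's entry there (pos ≤ j ≤ len)
theorem pvValB_eq (srt : List String) (u : String) (j : Nat)
    (hpos : pvInsPos srt u ≤ j) (hj : j ≤ srt.length) :
    (if (j : Int) = ((pvInsPos srt u : Nat) : Int) then u
        else PySem.List.pyGetD srt ((j : Int) - 1) "")
      = (srt.take (pvInsPos srt u) ++ u :: srt.drop (pvInsPos srt u)).getD j "" := by
  obtain ⟨hg1, hg2, hg3⟩ := pvSrt'_getD srt u (pvInsPos srt u) (pvInsPos_le srt u)
  by_cases hjp : j = pvInsPos srt u
  · subst hjp; rw [if_pos rfl, hg2]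
  · have hjp' : pvInsPos srt u < j := lt_of_le_of_ne hpos (Ne.symm hjp)
    rw [if_neg (by exact_mod_cast hjp), hg3 j hjp' hj]
    have hc : ((j : Int) - 1) = ((j - 1 : Nat) : Int) := by omega
    rw [hc, PySem.List.pyGetD_natCast]

-- the old letter at a shifted position differs from the new one there
theorem pvOld_ne_new (srt : List String) (u : String) (hp : srt.Pairwise (· < ·))
    (hu : u ∉ srt) (j : Nat) (hpos : pvInsPos srt u ≤ j) (hj : j < srt.length) :
    srt.getD j "" ≠ (srt.take (pvInsPos srt u) ++ u :: srt.drop (pvInsPos srt u)).getD j "" := by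
  obtain ⟨hg1, hg2, hg3⟩ := pvSrt'_getD srt u (pvInsPos srt u) (pvInsPos_le srt u)
  by_cases hjp : j = pvInsPos srt u
  · rw [hjp, hg2]
    intro hEq
    exact hu (hEq ▸ pvGetD_mem srt (pvInsPos srt u) (hjp ▸ hj))
  · have hjp' : pvInsPos srt u < j := lt_of_le_of_ne hpos (Ne.symm hjp)
    rw [hg3 j hjp' (by omega)]
    intro hEq
    have hlt : srt.getD (j - 1) "" < srt.getD j "" := by
      rw [List.getD_eq_getElem _ _ (by omega : j - 1 < srt.length),
        List.getD_eq_getElem _ _ hj]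
      exact List.pairwise_iff_getElem.mp hp (j - 1) j (by omega) hj (by omega)
    exact (ne_of_lt hlt) hEq.symm

-- Part 2: on the shifted suffix the two step functions produce the same fold
theorem pvPart2 (srt : List String) (u : String) (hp : srt.Pairwise (· < ·)) (hu : u ∉ srt)
    (nh : PySem.Dict Int (List String))
    (hsync : ∀ j : Nat, j < srt.length →
      ∃ L, nh.get? (j : Int) = some L ∧ PySem.List.pyGet? L (-1) = some (srt.getD j "")) :
    ∀ (n : Nat) (j : Nat), srt.length ≤ j + n → pvInsPos srt u ≤ j →
      ∀ s : PySem.Dict Int (List String),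
        (∀ i : Int, (j : Int) ≤ i → s.get? i = nh.get? i) →
        (PySem.List.pyRange (j : Int) (srt.length : Int) 1).foldl
            (pvStepA (srt.take (pvInsPos srt u) ++ u :: srt.drop (pvInsPos srt u))) s
          = (PySem.List.pyRange (j : Int) (srt.length : Int) 1).foldl
              (pvStepB srt u (pvInsPos srt u)) s := by
  intro n
  induction n with
  | zero =>
    intro j hj _ s _
    rw [PySem.List.pyRange_one_eq_nil (by omega)]
    rfl
  | succ n ih =>
    intro j hj hpos s hs
    by_cases hjlt : j < srt.length
    · obtain ⟨L, hL, hlast⟩ := hsync j hjlt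
      have hsj : s.get? (j : Int) = some L := (hs _ le_rfl).trans hL
      have hstep : pvStepA (srt.take (pvInsPos srt u) ++ u :: srt.drop (pvInsPos srt u))
            s (j : Int) = pvStepB srt u (pvInsPos srt u) s (j : Int) := by
        simp only [pvStepA, pvStepB, hsj, hlast, PySem.List.pyGetD_natCast]
        rw [if_pos (pvOld_ne_new srt u hp hu j hpos hjlt),
          pvValB_eq srt u j hpos (le_of_lt hjlt)]
      rw [PySem.List.pyRange_one_cons (by exact_mod_cast hjlt), List.foldl_cons,
        List.foldl_cons, hstep]
      have hc : ((j : Int) + 1) = ((j + 1 : Nat) : Int) := by push_cast; ring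
      rw [hc]
      apply ih (j + 1) (by omega) (by omega)
      intro i hi
      rw [pvStepB_get?_of_ne _ _ _ _ _ _ (by omega)]
      exact hs i (by omega)
    · rw [PySem.List.pyRange_one_eq_nil (by omega)]
      rfl

-- pvLastUpd touches only the key srt.length
theorem pvLastUpd_get?_of_ne (hist : PySem.Dict Int (List String)) (srt : List String)
    (u : String) (pos : Nat) (i : Int) (hne : i ≠ (srt.length : Int)) :
    (pvLastUpd hist srt u pos).get? i = hist.get? i := by
  cases hg : hist.get? (srt.length : Int) with
  | none =>
    simp only [pvLastUpd, hg]
    exact PySem.Dict.get?_insert_of_ne _ _ hne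
  | some L =>
    cases hL : PySem.List.pyGet? L (-1) with
    | none => simp only [pvLastUpd, hg, hL]
    | some last =>
      simp only [pvLastUpd, hg, hL]
      split_ifs
      · exact PySem.Dict.get?_insert_of_ne _ _ hne
      · rfl
      · exact PySem.Dict.get?_insert_of_ne _ _ hne
      · rfl

-- one B step at a present key is an append-insert
theorem pvStepB_eq_insert (srt : List String) (u : String) (pos : Nat)
    (h : PySem.Dict Int (List String)) (j : Int) (L : List String)
    (hL : h.get? j = some L) :
    pvStepB srt u pos h j
      = h.insert j (L ++ [if j = (pos : Int) then u
          else PySem.List.pyGetD srt (j - 1) ""]) := by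
  unfold pvStepB
  rw [hL]

-- value of the suffix fold at a processed position
theorem pvSuffixUpd_get?_at (hist : PySem.Dict Int (List String)) (srt : List String)
    (u : String) (pos j : Nat) (hpj : pos ≤ j) (hj : j < srt.length) (L : List String)
    (hL : hist.get? (j : Int) = some L) :
    (pvSuffixUpd hist srt u pos).get? (j : Int)
      = some (L ++ [if (j : Int) = (pos : Int) then u
          else PySem.List.pyGetD srt ((j : Int) - 1) ""]) := by
  rw [pvSuffixUpd_eq,
    PySem.List.pyRange_one_append (pos : Int) (j : Int) (srt.length : Int)
      (by exact_mod_cast hpj) (by exact_mod_cast le_of_lt hj),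
    List.foldl_append,
    PySem.List.pyRange_one_cons (a := (j : Int)) (b := (srt.length : Int))
      (by exact_mod_cast hj),
    List.foldl_cons]
  have h1 : ((PySem.List.pyRange (pos : Int) (j : Int) 1).foldl
      (pvStepB srt u pos) hist).get? (j : Int) = hist.get? (j : Int) := by
    apply pvFoldB_get?_of_notmem
    intro x hx
    have := (PySem.List.mem_pyRange_one.mp hx).2
    omega
  rw [pvStepB_eq_insert srt u pos _ (j : Int) L (h1.trans hL)]
  have h2 : ∀ s : PySem.Dict Int (List String),
      ((PySem.List.pyRange ((j : Int) + 1) (srt.length : Int) 1).foldl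
        (pvStepB srt u pos) s).get? (j : Int) = s.get? (j : Int) := fun s =>
    pvFoldB_get?_of_notmem srt u pos _ s _
      (fun x hx => by have := (PySem.List.mem_pyRange_one.mp hx).1; omega)
  rw [h2]
  exact PySem.Dict.get?_insert_self _ _ _

-- the suffix fold leaves positions outside [pos, srt.length) alone
theorem pvSuffixUpd_get?_out (hist : PySem.Dict Int (List String)) (srt : List String)
    (u : String) (pos : Nat) (i : Int)
    (hi : i < (pos : Int) ∨ (srt.length : Int) ≤ i) :
    (pvSuffixUpd hist srt u pos).get? i = hist.get? i := by
  rw [pvSuffixUpd_eq]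
  apply pvFoldB_get?_of_notmem
  intro x hx
  obtain ⟨h1, h2⟩ := PySem.List.mem_pyRange_one.mp hx
  omega

-- the assembled equality of the two history updates
theorem pvHistEq (srt : List String) (u : String) (hp : srt.Pairwise (· < ·)) (hu : u ∉ srt)
    (nh : PySem.Dict Int (List String))
    (hsync : ∀ j : Nat, j < srt.length →
      ∃ L, nh.get? (j : Int) = some L ∧ PySem.List.pyGet? L (-1) = some (srt.getD j ""))
    (hlastne : nh.get? (srt.length : Int) ≠ some ([] : List String))
    (letters : PySem.Dict String Int)
    (hkeys : letters.keys
      = srt.take (pvInsPos srt u) ++ u :: srt.drop (pvInsPos srt u))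
    (hsize : letters.size = srt.length + 1) :
    pvUpdateHistoryA nh letters = pvLastUpd (pvSuffixUpd nh srt u (pvInsPos srt u)) srt u
      (pvInsPos srt u) := by
  set pos := pvInsPos srt u with hposdef
  have hposle : pos ≤ srt.length := pvInsPos_le srt u
  rw [pvUpdateHistoryA_eq, hkeys, hsize]
  have hc1 : ((srt.length + 1 : Nat) : Int) = (srt.length : Int) + 1 := by push_cast; ring
  rw [hc1, PySem.List.pyRange_one_succ_right (by positivity), List.foldl_append,
    PySem.List.pyRange_one_append 0 (pos : Int) (srt.length : Int) (by positivity)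
      (by exact_mod_cast hposle),
    List.foldl_append]
  -- prefix: identity
  have hpre : (PySem.List.pyRange 0 (pos : Int) 1).foldl
      (pvStepA (srt.take pos ++ u :: srt.drop pos)) nh = nh := by
    apply pvFoldlFix
    intro i hi
    obtain ⟨hi0, hip⟩ := PySem.List.mem_pyRange_one.mp hi
    have hieq : i = ((i.toNat : Nat) : Int) := by omega
    have hitn : i.toNat < pos := by omega
    obtain ⟨L, hL, hlast⟩ := hsync i.toNat (by omega)
    obtain ⟨hg1, hg2, hg3⟩ := pvSrt'_getD srt u pos hposle
    rw [hieq]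
    simp only [pvStepA, hL, hlast, PySem.List.pyGetD_natCast]
    rw [hg1 i.toNat hitn, if_neg (by simp)]
  rw [hpre]
  -- middle: part 2
  rw [pvPart2 srt u hp hu nh hsync (srt.length - pos) pos (by omega) le_rfl nh
    (fun _ _ => rfl)]
  rw [← pvSuffixUpd_eq, ← hposdef]
  -- last index
  have hs2 : (pvSuffixUpd nh srt u pos).get? (srt.length : Int) = nh.get? (srt.length : Int) :=
    pvSuffixUpd_get?_out nh srt u pos _ (Or.inr le_rfl)
  obtain ⟨hg1, hg2, hg3⟩ := pvSrt'_getD srt u pos hposle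
  have hkeyA : PySem.List.pyGetD (srt.take pos ++ u :: srt.drop pos) ((srt.length : Nat) : Int) ""
      = (if srt.length = pos then u else PySem.List.pyGetD srt ((srt.length : Int) - 1) "") := by
    rw [PySem.List.pyGetD_natCast]
    by_cases hlp : srt.length = pos
    · rw [if_pos hlp, hlp]
      exact hg2
    · have hlp' : pos < srt.length := lt_of_le_of_ne hposle (Ne.symm hlp)
      rw [if_neg hlp, hg3 srt.length hlp' le_rfl]
      have hc : ((srt.length : Int) - 1) = ((srt.length - 1 : Nat) : Int) := by omega
      rw [hc, PySem.List.pyGetD_natCast]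
  rw [List.foldl_cons, List.foldl_nil]
  cases hg : nh.get? (srt.length : Int) with
  | none => simp only [pvStepA, pvLastUpd, hs2.trans hg, hkeyA]
  | some L =>
    have hLne : L ≠ [] := by intro hLe; exact hlastne (hLe ▸ hg)
    simp only [pvStepA, pvLastUpd, hs2.trans hg, PySem.List.pyGet?_neg_one,
      List.getLast?_eq_some_getLast hLne, hkeyA]

-- one character step preserves the invariant
theorem pvStep (history : List (Int × List String)) (S : List String) (hS : S.Nodup)
    (hPre : ∀ i : Int, 0 ≤ i → i < (S.length : Int) →
      (PySem.Dict.ofList history).get? i ≠ some ([] : List String))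
    (a : PySem.Dict String Int × PySem.Dict Int (List String))
    (b : PySem.Dict String Int × List String × PySem.Dict Int (List String))
    (h : pvInv history S a b) (c : Char)
    (hc : c ≠ ' ' → PySem.Str.upper (String.mk [c]) ∈ S) :
    pvInv history S
      (if c == ' ' then a
       else
         let u := PySem.Str.upper (String.mk [c])
         if a.1.contains u then (a.1.modify u 0 (· + 1), a.2)
         else
           let letters := pvSortA (a.1.insert u 1)
           (letters, pvUpdateHistoryA a.2 letters))
      (if c == ' ' then b
       else
         let u := PySem.Str.upper (String.mk [c])
         if b.1.contains u then (b.1.modify u 0 (· + 1), b.2.1, b.2.2)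
         else
           let pos := pvInsPos b.2.1 u
           let hist' := pvLastUpd (pvSuffixUpd b.2.2 b.2.1 u pos) b.2.1 u pos
           (b.1.insert u 1, PySem.List.insert b.2.1 (pos : Int) u, hist')) := by
  obtain ⟨h1, h2, h3, h4, h5, h6, h7⟩ := h
  by_cases hcsp : c == ' '
  · rw [if_pos hcsp, if_pos hcsp]; exact ⟨h1, h2, h3, h4, h5, h6, h7⟩
  rw [if_neg hcsp, if_neg hcsp]
  set u := PySem.Str.upper (String.mk [c]) with hudef
  have huS : u ∈ S := hc (by simpa using hcsp)
  have hnd : b.2.1.Nodup := h3.imp (fun h => ne_of_lt h)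
  have hcontA : a.1.contains u = true ↔ u ∈ b.2.1 := by
    rw [PySem.Dict.contains_iff_mem_keys, pvKeys_of_items_map a.1 b.2.1 _ h1]
  by_cases hu : u ∈ b.2.1
  · have hA : a.1.contains u = true := hcontA.mpr hu
    have hB : b.1.contains u = true := (h4 u).mpr hu
    simp only [hA, hB, if_true]
    refine ⟨pvInc_items a.1 b.1 b.2.1 u h1 hnd hu, h2, h3, ?_, h5, h6, h7⟩
    intro x
    rw [PySem.Dict.contains_modify]
    by_cases hxu : x = u
    · subst hxu; simp [hu]
    · simp [hxu, h4 x]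
  · have hA : a.1.contains u = false := by
      rw [← Bool.not_eq_true, hcontA]; exact hu
    have hB : b.1.contains u = false := by
      rw [← Bool.not_eq_true]; simp only [h4 u]; exact hu
    simp only [hA, hB, Bool.false_eq_true, if_false]
    set srt := b.2.1 with hsrtdef
    set pos := pvInsPos srt u with hposdef
    have hposle : pos ≤ srt.length := pvInsPos_le srt u
    have hks' : PySem.List.insert srt ((pos : Nat) : Int) u
        = srt.take pos ++ u :: srt.drop pos :=
      PySem.List.insert_natCast srt pos u hposle
    obtain ⟨hpair', hmem'⟩ := pvKs'_facts srt u h3 hu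
    rw [← hposdef] at hpair' hmem' 
    have hnd' : (PySem.List.insert srt ((pos : Nat) : Int) u).Nodup :=
      hpair'.imp (fun h => ne_of_lt h)
    have hlen' : (PySem.List.insert srt ((pos : Nat) : Int) u).length = srt.length + 1 := by
      rw [hks']; simp [Nat.min_eq_left hposle]
    -- length bound: srt.length + 1 ≤ S.length
    have hsub : PySem.List.insert srt ((pos : Nat) : Int) u ⊆ S := by
      intro x hx
      rcases (hmem' x).mp hx with hxs | rfl
      · exact h7 x hxs
      · exact huS
    have hbound : srt.length + 1 ≤ S.length := by
      have := pvNodupSubset_length _ S hnd' hsub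
      omega
    have hlastne : b.2.2.get? (srt.length : Int) ≠ some ([] : List String) := by
      rw [h6 (srt.length : Int) le_rfl]
      exact hPre (srt.length : Int) (by positivity) (by exact_mod_cast hbound)
    have hitems := pvIns_items a.1 b.1 srt u h1 h3 hu
    rw [← hposdef] at hitems
    have hkeys' : (pvSortA (a.1.insert u 1)).keys
        = PySem.List.insert srt ((pos : Nat) : Int) u :=
      pvKeys_of_items_map _ _ _ hitems
    have hsize' : (pvSortA (a.1.insert u 1)).size = srt.length + 1 := by
      simp only [PySem.Dict.size, hitems, List.length_map]
      rw [hlen']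
    have hsync : ∀ j : Nat, j < srt.length →
        ∃ L, b.2.2.get? (j : Int) = some L ∧
          PySem.List.pyGet? L (-1) = some (srt.getD j "") := h5
    have hhist : pvUpdateHistoryA a.2 (pvSortA (a.1.insert u 1))
        = pvLastUpd (pvSuffixUpd b.2.2 srt u pos) srt u pos := by
      rw [h2]
      exact pvHistEq srt u h3 hu b.2.2 hsync hlastne _ (hks' ▸ hkeys') hsize'
    obtain ⟨hg1, hg2, hg3⟩ := pvSrt'_getD srt u pos hposle
    have hvlast : (if srt.length = pos then u
          else PySem.List.pyGetD srt ((srt.length : Int) - 1) "")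
        = (srt.take pos ++ u :: srt.drop pos).getD srt.length "" := by
      by_cases hlp : srt.length = pos
      · rw [if_pos hlp, hlp]
        exact hg2.symm
      · have hlp' : pos < srt.length := lt_of_le_of_ne hposle (Ne.symm hlp)
        rw [if_neg hlp, hg3 srt.length hlp' le_rfl]
        have hcst : ((srt.length : Int) - 1) = ((srt.length - 1 : Nat) : Int) := by omega
        rw [hcst, PySem.List.pyGetD_natCast]
    refine ⟨hitems, hhist, hpair', ?_, ?_, ?_, hsub⟩
    · intro x
      rw [PySem.Dict.contains_insert]
      by_cases hxu : x = u
      · subst hxu; simp [hmem' u]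
      · simp [hxu, hmem' x, h4 x]
    · -- sync for the new state
      intro j hj
      rw [hlen'] at hj
      rw [hks']
      by_cases hjpos : j < pos
      · obtain ⟨L, hL, hlast⟩ := h5 j (by omega)
        refine ⟨L, ?_, ?_⟩
        · rw [pvLastUpd_get?_of_ne _ _ _ _ _ (by
            have : j < srt.length := by omega
            omega),
            pvSuffixUpd_get?_out _ _ _ _ _ (Or.inl (by exact_mod_cast hjpos))]
          exact hL
        · rw [hg1 j hjpos]; exact hlast
      · by_cases hjlen : j < srt.length
        · obtain ⟨L, hL, _⟩ := h5 j hjlen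
          refine ⟨L ++ [if (j : Int) = (pos : Int) then u
              else PySem.List.pyGetD srt ((j : Int) - 1) ""], ?_, ?_⟩
          · rw [pvLastUpd_get?_of_ne _ _ _ _ _ (by omega)]
            exact pvSuffixUpd_get?_at b.2.2 srt u pos j (by omega) hjlen L hL
          · rw [PySem.List.pyGet?_neg_one, List.getLast?_append_of_ne_nil _ (by simp)]
            rw [pvValB_eq srt u j (by omega) (by omega), ← hposdef]
            simp
        · -- j = srt.length: the freshly created position
          have hjeq : j = srt.length := by omega
          subst hjeq
          have hs2 : (pvSuffixUpd b.2.2 srt u pos).get? (srt.length : Int)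
              = b.2.2.get? (srt.length : Int) :=
            pvSuffixUpd_get?_out _ _ _ _ _ (Or.inr le_rfl)
          cases hg : b.2.2.get? (srt.length : Int) with
          | none =>
            simp only [pvLastUpd, hs2.trans hg]
            refine ⟨_, PySem.Dict.get?_insert_self _ _ _, ?_⟩
            rw [PySem.List.pyGet?_neg_one, hvlast]
            simp
          | some L =>
            have hLne : L ≠ [] := by intro hLe; exact hlastne (hLe ▸ hg)
            simp only [pvLastUpd, hs2.trans hg, PySem.List.pyGet?_neg_one,
              List.getLast?_eq_some_getLast hLne]
            by_cases hcnd : L.getLast hLne ≠ (if srt.length = pos then u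
                else PySem.List.pyGetD srt ((srt.length : Int) - 1) "")
            · rw [if_pos hcnd]
              refine ⟨_, PySem.Dict.get?_insert_self _ _ _, ?_⟩
              rw [List.getLast?_append_of_ne_nil _ (by simp), hvlast]
              simp
            · rw [if_neg hcnd]
              push_neg at hcnd
              refine ⟨L, hs2.trans hg, ?_⟩
              rw [List.getLast?_eq_some_getLast hLne, hcnd, hvlast]
    · -- untouched above the new length
      intro i hi
      rw [hlen'] at hi
      rw [pvLastUpd_get?_of_ne _ _ _ _ _ (by omega),
        pvSuffixUpd_get?_out _ _ _ _ _ (Or.inr (by omega))]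
      exact h6 i (by omega)

theorem pvFold (history : List (Int × List String)) (S : List String) (hS : S.Nodup)
    (hPre : ∀ i : Int, 0 ≤ i → i < (S.length : Int) →
      (PySem.Dict.ofList history).get? i ≠ some ([] : List String))
    (cs : List Char) (hcs : ∀ c ∈ cs, c ≠ ' ' → PySem.Str.upper (String.mk [c]) ∈ S)
    (a : PySem.Dict String Int × PySem.Dict Int (List String))
    (b : PySem.Dict String Int × List String × PySem.Dict Int (List String))
    (h : pvInv history S a b) :
    pvInv history S
      (cs.foldl (fun st c =>
        if c == ' ' then st
        else
          let u := PySem.Str.upper (String.mk [c])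
          if st.1.contains u then (st.1.modify u 0 (· + 1), st.2)
          else
            let letters := pvSortA (st.1.insert u 1)
            (letters, pvUpdateHistoryA st.2 letters)) a)
      (cs.foldl (fun st c =>
        if c == ' ' then st
        else
          let u := PySem.Str.upper (String.mk [c])
          if st.1.contains u then (st.1.modify u 0 (· + 1), st.2.1, st.2.2)
          else
            let pos := pvInsPos st.2.1 u
            let hist' := pvLastUpd (pvSuffixUpd st.2.2 st.2.1 u pos) st.2.1 u pos
            (st.1.insert u 1, PySem.List.insert st.2.1 (pos : Int) u, hist')) b) := by
  induction cs generalizing a b with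
  | nil => exact h
  | cons c cs ih =>
    exact ih (fun x hx => hcs x (List.mem_cons_of_mem _ hx)) _ _
      (pvStep history S hS hPre a b h c (hcs c (List.mem_cons_self)))

theorem pvFinal (input : String) (history : List (Int × List String))
    (hpre : Pre_string_to_letters_counts input history) :
    string_to_letters_counts input history = string_to_letters_counts_alt input history := by
  unfold string_to_letters_counts string_to_letters_counts_alt
  set S := PySem.Set.ofList ((input.toList.filter (fun c => c ≠ ' ')).map
    (fun c => PySem.Str.upper (String.mk [c]))) with hSdef
  have hS : S.Nodup := PySem.Set.nodup_ofList _
  have hPre : ∀ i : Int, 0 ≤ i → i < (S.length : Int) →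
      (PySem.Dict.ofList history).get? i ≠ some ([] : List String) := by
    intro i h0 hlt
    exact hpre i (PySem.List.mem_pyRange_one.mpr ⟨h0, hlt⟩)
  have hcs : ∀ c ∈ input.toList, c ≠ ' ' → PySem.Str.upper (String.mk [c]) ∈ S := by
    intro c hc hcsp
    rw [hSdef, PySem.Set.mem_ofList]
    exact List.mem_map_of_mem (List.mem_filter.mpr ⟨hc, by simpa using hcsp⟩)
  obtain ⟨h1, h2, h3, h4, h5, h6, h7⟩ := pvFold history S hS hPre input.toList hcs
    ((PySem.Dict.empty : PySem.Dict String Int), PySem.Dict.ofList history)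
    ((PySem.Dict.empty : PySem.Dict String Int), ([] : List String), PySem.Dict.ofList history)
    ⟨by simp [PySem.Dict.empty], rfl, List.Pairwise.nil,
      by simp [PySem.Dict.contains_empty], by simp, fun _ _ => rfl, by simp⟩
  simp only []
  rw [h1, h2]

-- ===== VERDICT (by name: the statement is the Claim_ definition above) =====
theorem string_to_letters_counts_spec : Claim_equal_string_to_letters_counts := by
  intro input history _ hpre
  exact pvFinal input history hpre
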